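-- pv_equiv track=rewrite | github.com/geoffreylzf/investhubapi | investhubapi/permissions/access.py | reconstruct_route
-- ===== SOURCE A (Python) =====
-- def reconstruct_route(route):
--     regex_start = route.find("(")
--     regex_end = route.find(")")
--
--     if regex_start == -1:
--         return route
--     else:
--         regex = route[regex_start:regex_end + 1]
--         param_start = regex.find("<")
--         param_end = regex.find(">")
--         param = regex[param_start:param_end + 1]
--         return reconstruct_route(route.replace(regex, param))
-- ===== SOURCE B (Python) =====
-- def reconstruct_route(route):
--     out = []
--     i = 0
--     n = len(route)
--     while i < n:
--         c = route[i]
--         if c != "(":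
--             out.append(c)
--             i += 1
--         else:
--             j = i + 1
--             buf = []
--             while j < n and route[j] != ")":
--                 buf.append(route[j])
--                 j += 1
--             group = "".join(buf)
--             lt = group.find("<")
--             gt = group.find(">")
--             if lt != -1 and lt <= gt:
--                 out.append(group[lt:gt + 1])
--             i = j + 1
--     return "".join(out)
-- ===== Notes on version B (the rewrite author's own statement) =====
-- stated objective: simpler
-- what changed: A repeatedly re-scans and rewrites the whole route (find the leftmost group, collapse every copy of it with str.replace over the entire string, recurse on the rewritten route); B makes one left-to-right pass, copying literal characters and collapsing each capture group to its angle-bracketed parameter as it goes.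
-- outside the precondition, e.g. on reconstruct_route('(<(>)x)'): A returns '<', B returns '<(>x)'; on reconstruct_route('((a<p>)b)'): A returns '<p>b)', B returns '<p>b)'
import Mathlib
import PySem

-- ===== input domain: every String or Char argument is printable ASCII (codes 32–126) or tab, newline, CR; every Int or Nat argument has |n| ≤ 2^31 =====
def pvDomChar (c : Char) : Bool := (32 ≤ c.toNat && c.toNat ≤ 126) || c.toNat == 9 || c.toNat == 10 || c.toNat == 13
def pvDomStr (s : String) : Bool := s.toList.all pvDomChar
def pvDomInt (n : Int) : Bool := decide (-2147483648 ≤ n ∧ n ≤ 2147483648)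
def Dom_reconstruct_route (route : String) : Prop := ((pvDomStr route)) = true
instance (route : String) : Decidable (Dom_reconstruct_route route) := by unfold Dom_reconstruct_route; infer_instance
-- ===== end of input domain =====

-- B rewrites A's repeated find/replace recursion as one left-to-right scan (objective: simpler/alternative single pass).
-- ===== PORT A =====
-- A is recursive; its Lean port uses a fuel of `len route`, which suffices on every input
-- admitted by Pre_ (each recursive call there removes at least one opening parenthesis).
def reconstruct_route_go (fuel : Nat) (route : String) : String :=
  match fuel with
  | 0 => route
  | fuel + 1 =>
    let regex_start := PySem.Str.find route "("
    let regex_end := PySem.Str.find route ")"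
    if regex_start = -1 then route
    else
      let regex := PySem.Str.slice route (some regex_start) (some (regex_end + 1))
      let param_start := PySem.Str.find regex "<"
      let param_end := PySem.Str.find regex ">"
      let param := PySem.Str.slice regex (some param_start) (some (param_end + 1))
      reconstruct_route_go fuel (PySem.Str.replace route regex param)

def reconstruct_route (route : String) : String :=
  reconstruct_route_go (PySem.Str.len route).toNat route

-- ===== PORT B =====
-- the parameter kept from one group: its angle-bracketed part, or nothing
def alt_param (group : List Char) : List Char :=
  let lt := PySem.Chars.find group "<".toList
  let gt := PySem.Chars.find group ">".toList
  if lt ≠ -1 ∧ lt ≤ gt then PySem.Chars.slice group (some lt) (some (gt + 1)) else []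

-- inner while loop of B: collect chars up to the first closing parenthesis (the group body) and return the rest
def alt_scan (cs : List Char) : List Char × List Char :=
  match cs with
  | [] => ([], [])
  | c :: t => if c = ')' then ([], t) else
      let (buf, rest) := alt_scan t
      (c :: buf, rest)

theorem alt_scan_snd_length (cs : List Char) : (alt_scan cs).2.length ≤ cs.length := by
  induction cs with
  | nil => simp [alt_scan]
  | cons c t ih =>
    simp only [alt_scan]
    split
    · simp
    · simpa using Nat.le_succ_of_le ih

-- outer while loop of B
def alt_go (cs : List Char) : List Char :=
  match cs with
  | [] => []
  | c :: t =>
    if c ≠ '(' then c :: alt_go t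
    else
      alt_param (alt_scan t).1 ++ alt_go (alt_scan t).2
termination_by cs.length
decreasing_by
  · simp
  · simpa using Nat.lt_succ_of_le (alt_scan_snd_length t)

def reconstruct_route_alt (route : String) : String :=
  String.ofList (alt_go route.toList)

-- ===== PRECONDITION & SPEC =====
-- wfIn/wfOut: a 3-state scan of the route. Inside a capture group no further opening
-- parenthesis is allowed and the group must be closed; outside a group, a closing parenthesis
-- may only occur once no opening parenthesis follows. Exactly on such routes A's
-- leftmost-group recursion is a well-behaved strip-each-group-to-its-parameter.
mutual
def wfIn : List Char → Bool
  | [] => false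
  | c :: t => if c = '(' then false else if c = ')' then wfOut t else wfIn t
def wfOut : List Char → Bool
  | [] => true
  | c :: t => if c = '(' then wfIn t else if c = ')' then !t.contains '(' else wfOut t
end

-- Pre_ excludes routes with nested, unmatched or wrongly ordered parentheses: there A either
-- recurses forever (Python: RecursionError) or, when it does return, the value is an accident
-- of its slicing at the globally first closing parenthesis and its re-scanning of replaced text.
def Pre_reconstruct_route (route : String) : Prop := wfOut route.toList = true
instance (route : String) : Decidable (Pre_reconstruct_route route) := by
  unfold Pre_reconstruct_route; infer_instance

def pvWitness_reconstruct_route : String := "api/(?P<pk>[0-9]+)/detail"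

def Spec_reconstruct_route (route : String) (out : String) : Prop := out = reconstruct_route_alt route
instance (route : String) (out : String) : Decidable (Spec_reconstruct_route route out) := by unfold Spec_reconstruct_route; infer_instance

-- ===== CLAIM (what is proved, stated in full; the proofs are below) =====
def Claim_equal_reconstruct_route : Prop := ∀ (route : String), Dom_reconstruct_route route → Pre_reconstruct_route route → Spec_reconstruct_route route (reconstruct_route route)

-- ===== LEMMAS AND PROOFS =====

-- §1 find on a singleton pattern
theorem find_eq_of_first (s sub : List Char) (k : Nat)
    (h1 : sub <+: s.drop k) (h2 : ∀ i, i < k → ¬ sub <+: s.drop i) :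
    PySem.Chars.find s sub = (k : Int) := by
  have hinf : sub <:+: s := (h1.isInfix).trans (List.drop_suffix k s).isInfix
  have h0 : 0 ≤ PySem.Chars.find s sub := by
    rw [PySem.Chars.find_nonneg_iff]; exact hinf
  obtain ⟨hp, hmin⟩ := PySem.Chars.find_spec h0
  have hk : (PySem.Chars.find s sub).toNat = k := by
    rcases Nat.lt_trichotomy (PySem.Chars.find s sub).toNat k with h|h|h
    · exact absurd hp (h2 _ h)
    · exact h
    · exact absurd h1 (hmin k h)
  omega

theorem not_prefix_singleton (s : List Char) (c : Char) (i : Nat) (hi : i < s.length)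
    (hne : s[i] ≠ c) : ¬ [c] <+: s.drop i := by
  rintro ⟨t, ht⟩
  have h0 : (List.drop i s)[0]? = some c := by rw [← ht]; rfl
  rw [List.getElem?_drop, Nat.add_zero, List.getElem?_eq_getElem hi] at h0
  exact hne (Option.some.inj h0)

theorem find_first (u : List Char) (c : Char) (v : List Char) (h : c ∉ u) :
    PySem.Chars.find (u ++ c :: v) [c] = (u.length : Int) := by
  apply find_eq_of_first
  · rw [List.drop_left]; exact ⟨v, rfl⟩
  · intro i hi
    apply not_prefix_singleton _ _ _ (by simp; omega)
    rw [List.getElem_append_left hi]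
    intro he; exact h (he ▸ List.getElem_mem hi)

theorem find_none (l : List Char) (c : Char) (h : c ∉ l) :
    PySem.Chars.find l [c] = -1 := by
  rw [PySem.Chars.find_eq_neg_one_iff, List.singleton_infix_iff]; exact h

theorem find_singleton_mem (l : List Char) (c : Char) (h : c ∈ l) :
    PySem.Chars.find l [c] = (List.idxOf c l : Int) := by
  have hlt := List.idxOf_lt_length_of_mem h
  apply find_eq_of_first
  · rw [List.drop_eq_getElem_cons hlt, List.getElem_idxOf hlt]
    exact ⟨_, rfl⟩
  · intro i hi
    apply not_prefix_singleton _ _ _ (by omega)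
    intro he
    have ht : i < (l.take (i + 1)).length := by simp; omega
    have hmem : c ∈ l.take (i + 1) := by
      have hm := List.getElem_mem ht
      rwa [List.getElem_take, he] at hm
    rw [List.mem_take_iff_idxOf_lt h] at hmem
    omega

theorem find_regex (b : List Char) (c : Char) (hco : c ≠ '(') (hcc : c ≠ ')') :
    PySem.Chars.find ('(' :: (b ++ [')'])) [c] =
      if c ∈ b then (List.idxOf c b : Int) + 1 else -1 := by
  by_cases h : c ∈ b
  · rw [find_singleton_mem _ _ (by simp [h])]
    rw [List.idxOf_cons_ne _ (fun he => hco he.symm), List.idxOf_append]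
    simp [h]
  · rw [find_none]
    · simp [h]
    · simp [h, hco, hcc]

-- §2 the per-group parameter: A's slice of the regex equals B's alt_param of the body
theorem param_regex (b : List Char) :
    PySem.Chars.slice ('(' :: (b ++ [')']))
      (some (PySem.Chars.find ('(' :: (b ++ [')'])) ['<']))
      (some (PySem.Chars.find ('(' :: (b ++ [')'])) ['>'] + 1)) = alt_param b := by
  have hlt : ("<" : String).toList = ['<'] := by decide
  have hgt : (">" : String).toList = ['>'] := by decide
  rw [find_regex b '<' (by decide) (by decide), find_regex b '>' (by decide) (by decide)]
  unfold alt_param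
  rw [hlt, hgt]
  by_cases h1 : '<' ∈ b
  · have hi1 := List.idxOf_lt_length_of_mem h1
    rw [if_pos h1, find_singleton_mem _ _ h1]
    have e1 : ((List.idxOf '<' b : Int) + 1) = ((List.idxOf '<' b + 1 : Nat) : Int) := by
      push_cast; ring
    by_cases h2 : '>' ∈ b
    · have hi2 := List.idxOf_lt_length_of_mem h2
      rw [if_pos h2, find_singleton_mem _ _ h2]
      have e2 : ((List.idxOf '>' b : Int) + 1 + 1) = ((List.idxOf '>' b + 2 : Nat) : Int) := by
        push_cast; ring
      by_cases h3 : List.idxOf '<' b ≤ List.idxOf '>' b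
      · rw [if_pos ⟨by simp, by exact_mod_cast h3⟩]
        have e3 : ((List.idxOf '>' b : Int) + 1) = ((List.idxOf '>' b + 1 : Nat) : Int) := by
          push_cast; ring
        rw [e1, e2, e3]
        simp only [PySem.Chars.slice_eq_listSlice, PySem.List.slice_natCast]
        rw [List.drop_succ_cons, List.drop_append_of_le_length (by omega)]
        rw [List.take_append_of_le_length (by simp; omega)]
        congr 1
        omega
      · rw [if_neg (by rintro ⟨-, hc⟩; exact h3 (by exact_mod_cast hc))]
        rw [e1, e2]
        simp only [PySem.Chars.slice_eq_listSlice, PySem.List.slice_natCast]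
        have hz : List.idxOf '>' b + 2 - (List.idxOf '<' b + 1) = 0 := by omega
        rw [hz, List.take_zero]
    · rw [if_neg h2, find_none _ _ h2]
      rw [if_neg (by
        rintro ⟨-, hc⟩
        have := Int.natCast_nonneg (List.idxOf '<' b)
        omega)]
      have e0 : (-1 + 1 : Int) = ((0 : Nat) : Int) := by norm_num
      rw [e0, e1]
      simp only [PySem.Chars.slice_eq_listSlice, PySem.List.slice_natCast]
      simp
  · rw [if_neg h1, find_none _ _ h1]
    by_cases h2 : '>' ∈ b
    · have hi2 := List.idxOf_lt_length_of_mem h2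
      rw [if_pos h2, find_singleton_mem _ _ h2]
      rw [if_neg (by rintro ⟨hc, -⟩; exact hc rfl)]
      apply List.eq_nil_of_length_eq_zero
      simp only [PySem.Chars.slice_eq_listSlice]
      rw [PySem.List.length_slice]
      have e2 : ((List.idxOf '>' b : Int) + 1 + 1) = ((List.idxOf '>' b + 2 : Nat) : Int) := by
        push_cast; ring
      rw [e2, PySem.List.clampIdx_neg_one, PySem.List.clampIdx_natCast]
      simp; omega
    · rw [if_neg h2, find_none _ _ h2]
      rw [if_neg (by rintro ⟨hc, -⟩; exact hc rfl)]
      apply List.eq_nil_of_length_eq_zero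
      simp only [PySem.Chars.slice_eq_listSlice]
      rw [PySem.List.length_slice]
      have e0 : (-1 + 1 : Int) = ((0 : Nat) : Int) := by norm_num
      rw [e0, PySem.List.clampIdx_neg_one, PySem.List.clampIdx_natCast]
      simp

-- §3 Python's str.replace with a nonempty pattern, as plain recursion
def repl (c₀ : Char) (o new : List Char) : List Char → List Char
  | [] => []
  | c :: t =>
    if (c₀ :: o).isPrefixOf (c :: t) then new ++ repl c₀ o new (t.drop o.length)
    else c :: repl c₀ o new t
termination_by l => l.length
decreasing_by
  · simp only [List.length_cons, List.length_drop]; omega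
  · simp

theorem replace_go_eq (c₀ : Char) (o new : List Char) :
    ∀ (fuel : Nat) (l acc : List Char), l.length ≤ fuel →
      PySem.Chars.replace.go (c₀ :: o) new fuel l acc = acc.reverse ++ repl c₀ o new l := by
  intro fuel
  induction fuel with
  | zero =>
    intro l acc h
    have hl : l = [] := List.eq_nil_of_length_eq_zero (by omega)
    subst hl
    simp [PySem.Chars.replace.go, repl]
  | succ n ih =>
    intro l acc h
    match l with
    | [] => simp [PySem.Chars.replace.go, repl]
    | c :: t =>
      rw [PySem.Chars.replace.go]
      by_cases hp : (c₀ :: o).isPrefixOf (c :: t)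
      · rw [if_pos hp]
        rw [ih (List.drop (c₀ :: o).length (c :: t)) _ (by
          simp only [List.length_cons, List.length_drop] at *; omega)]
        have hd : List.drop (c₀ :: o).length (c :: t) = t.drop o.length := by
          simp [List.drop_succ_cons]
        rw [hd]
        conv_rhs => rw [repl]
        rw [if_pos hp]
        simp
      · rw [if_neg hp]
        rw [ih t _ (by simp at h; omega)]
        conv_rhs => rw [repl]
        rw [if_neg hp]
        simp

theorem replace_eq_repl (c₀ : Char) (o new s : List Char) :
    PySem.Chars.replace s (c₀ :: o) new = repl c₀ o new s := by
  unfold PySem.Chars.replace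
  rw [if_neg (by simp)]
  simpa using replace_go_eq c₀ o new s.length s [] le_rfl

theorem repl_nil (c₀ : Char) (o new : List Char) : repl c₀ o new [] = [] := by
  simp [repl]

theorem repl_cons_ne (c₀ : Char) (o new t : List Char) (c : Char) (h : c ≠ c₀) :
    repl c₀ o new (c :: t) = c :: repl c₀ o new t := by
  rw [repl, if_neg]
  intro hp
  rw [List.isPrefixOf_iff_prefix] at hp
  exact h ((List.cons_prefix_cons.mp hp).1.symm)

theorem repl_free (c₀ : Char) (o new : List Char) :
    ∀ u v, c₀ ∉ u → repl c₀ o new (u ++ v) = u ++ repl c₀ o new v := by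
  intro u
  induction u with
  | nil => intro v _; simp
  | cons x xs ih =>
    intro v h
    rw [List.cons_append, repl_cons_ne _ _ _ _ _ (List.ne_of_not_mem_cons h).symm,
      ih v (List.not_mem_of_not_mem_cons h)]
    rfl

theorem repl_id (c₀ : Char) (o new : List Char) (l : List Char) (h : c₀ ∉ l) :
    repl c₀ o new l = l := by
  have := repl_free c₀ o new l [] h
  simpa [repl_nil] using this

theorem paren_prefix_iff (b b' r : List Char) (hb : ')' ∉ b) (hb' : ')' ∉ b') :
    b ++ [')'] <+: b' ++ ')' :: r ↔ b = b' := by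
  induction b generalizing b' with
  | nil =>
    cases b' with
    | nil => simp [List.cons_prefix_cons]
    | cons y ys =>
      have hy : y ≠ ')' := (List.ne_of_not_mem_cons hb').symm
      simp [List.cons_prefix_cons, Ne.symm hy]
  | cons x xs ih =>
    have hx : x ≠ ')' := (List.ne_of_not_mem_cons hb).symm
    cases b' with
    | nil => simp [List.cons_prefix_cons, hx]
    | cons y ys =>
      have hxs : ')' ∉ xs := List.not_mem_of_not_mem_cons hb
      have hys : ')' ∉ ys := List.not_mem_of_not_mem_cons hb'
      simp only [List.cons_append, List.cons_prefix_cons, List.cons.injEq]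
      constructor
      · rintro ⟨hxy, hp⟩; exact ⟨hxy, (ih ys hxs hys).mp hp⟩
      · rintro ⟨hxy, he⟩; exact ⟨hxy, (ih ys hxs hys).mpr he⟩

theorem repl_hit (b pr r : List Char) (hbc : ')' ∉ b) :
    repl '(' (b ++ [')']) pr ('(' :: (b ++ ')' :: r)) = pr ++ repl '(' (b ++ [')']) pr r := by
  rw [repl, if_pos]
  · have hd : List.drop (b ++ [')']).length (b ++ ')' :: r) = r := by
      rw [show b ++ ')' :: r = (b ++ [')']) ++ r from by simp]
      exact List.drop_left
    rw [hd]
  · rw [List.isPrefixOf_iff_prefix, List.cons_prefix_cons]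
    exact ⟨rfl, (paren_prefix_iff b b r hbc hbc).mpr rfl⟩

theorem repl_miss (b b' pr r : List Char) (hbc : ')' ∉ b) (hbo' : '(' ∉ b') (hbc' : ')' ∉ b')
    (hne : b' ≠ b) :
    repl '(' (b ++ [')']) pr ('(' :: (b' ++ ')' :: r))
      = '(' :: (b' ++ ')' :: repl '(' (b ++ [')']) pr r) := by
  rw [repl, if_neg]
  · rw [show b' ++ ')' :: r = (b' ++ [')']) ++ r from by simp,
      repl_free _ _ _ _ _ (by simp [hbo'])]
    simp
  · intro hp
    rw [List.isPrefixOf_iff_prefix, List.cons_prefix_cons] at hp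
    exact hne ((paren_prefix_iff b b' r hbc hbc').mp hp.2).symm

-- §4 facts about the well-formedness scan
theorem wfOut_cons_other (c : Char) (t : List Char) (h1 : c ≠ '(') (h2 : c ≠ ')') :
    wfOut (c :: t) = wfOut t := by
  simp [wfOut, h1, h2]

theorem wfIn_cons_other (c : Char) (t : List Char) (h1 : c ≠ '(') (h2 : c ≠ ')') :
    wfIn (c :: t) = wfIn t := by
  simp [wfIn, h1, h2]

theorem wfOut_free (u : List Char) (v : List Char) (h1 : '(' ∉ u) (h2 : ')' ∉ u) :
    wfOut (u ++ v) = wfOut v := by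
  induction u with
  | nil => simp
  | cons x xs ih =>
    rw [List.cons_append,
      wfOut_cons_other _ _ (List.ne_of_not_mem_cons h1).symm (List.ne_of_not_mem_cons h2).symm,
      ih (List.not_mem_of_not_mem_cons h1) (List.not_mem_of_not_mem_cons h2)]

theorem wfIn_free (u : List Char) (v : List Char) (h1 : '(' ∉ u) (h2 : ')' ∉ u) :
    wfIn (u ++ v) = wfIn v := by
  induction u with
  | nil => simp
  | cons x xs ih =>
    rw [List.cons_append,
      wfIn_cons_other _ _ (List.ne_of_not_mem_cons h1).symm (List.ne_of_not_mem_cons h2).symm,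
      ih (List.not_mem_of_not_mem_cons h1) (List.not_mem_of_not_mem_cons h2)]

theorem wf_group (b r : List Char) (hbo : '(' ∉ b) (hbc : ')' ∉ b) :
    wfOut ('(' :: (b ++ ')' :: r)) = wfOut r := by
  show wfIn (b ++ ')' :: r) = wfOut r
  rw [wfIn_free b _ hbo hbc]
  rfl

theorem wfIn_decomp :
    ∀ t, wfIn t = true → ∃ b r, t = b ++ ')' :: r ∧ '(' ∉ b ∧ ')' ∉ b ∧ wfOut r = true := by
  intro t
  induction t with
  | nil => intro h; simp [wfIn] at h
  | cons c t ih =>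
    intro h
    by_cases h1 : c = '('
    · subst h1; simp [wfIn] at h
    · by_cases h2 : c = ')'
      · subst h2
        refine ⟨[], t, by simp, by simp, by simp, ?_⟩
        simpa [wfIn] using h
      · rw [wfIn_cons_other _ _ h1 h2] at h
        obtain ⟨b, r, rfl, hbo, hbc, hwf⟩ := ih h
        refine ⟨c :: b, r, by simp, ?_, ?_, hwf⟩
        · intro hm
          rcases List.mem_cons.mp hm with he | hm2
          · exact h1 he.symm
          · exact hbo hm2
        · intro hm
          rcases List.mem_cons.mp hm with he | hm2
          · exact h2 he.symm
          · exact hbc hm2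

theorem wf_decomp :
    ∀ cs, wfOut cs = true → '(' ∈ cs →
      ∃ p b r, cs = p ++ '(' :: (b ++ ')' :: r) ∧ '(' ∉ p ∧ ')' ∉ p ∧ '(' ∉ b ∧ ')' ∉ b ∧
        wfOut r = true := by
  intro cs
  induction cs with
  | nil => intro _ hm; simp at hm
  | cons c t ih =>
    intro h hm
    by_cases h1 : c = '('
    · subst h1
      have hin : wfIn t = true := by simpa [wfOut] using h
      obtain ⟨b, r, rfl, hbo, hbc, hwf⟩ := wfIn_decomp t hin
      exact ⟨[], b, r, by simp, by simp, by simp, hbo, hbc, hwf⟩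
    · by_cases h2 : c = ')'
      · subst h2
        have hnc : t.contains '(' = false := by
          have := h
          simp [wfOut] at this
          simpa using this
        have hti : '(' ∉ t := by simpa using hnc
        rcases List.mem_cons.mp hm with he | hm2
        · exact absurd he (by decide)
        · exact absurd hm2 hti
      · rw [wfOut_cons_other _ _ h1 h2] at h
        have hm' : '(' ∈ t := by
          rcases List.mem_cons.mp hm with he | hm2
          · exact absurd he.symm h1
          · exact hm2
        obtain ⟨p, b, r, rfl, hpo, hpc, hbo, hbc, hwf⟩ := ih h hm'
        refine ⟨c :: p, b, r, by simp, ?_, ?_, hbo, hbc, hwf⟩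
        · intro hm
          rcases List.mem_cons.mp hm with he | hm2
          · exact h1 he.symm
          · exact hpo hm2
        · intro hm
          rcases List.mem_cons.mp hm with he | hm2
          · exact h2 he.symm
          · exact hpc hm2

-- §5 facts about B's loop
theorem alt_nil : alt_go [] = [] := by simp [alt_go]

theorem alt_cons_ne (c : Char) (t : List Char) (h : c ≠ '(') :
    alt_go (c :: t) = c :: alt_go t := by
  rw [alt_go]
  simp [h]

theorem alt_cons_open (t : List Char) :
    alt_go ('(' :: t) = alt_param (alt_scan t).1 ++ alt_go (alt_scan t).2 := by
  rw [alt_go]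
  simp

theorem alt_free (u v : List Char) (h : '(' ∉ u) : alt_go (u ++ v) = u ++ alt_go v := by
  induction u with
  | nil => simp
  | cons x xs ih =>
    rw [List.cons_append, alt_cons_ne _ _ (List.ne_of_not_mem_cons h).symm,
      ih (List.not_mem_of_not_mem_cons h)]
    rfl

theorem alt_id (l : List Char) (h : '(' ∉ l) : alt_go l = l := by
  have := alt_free l [] h
  simpa [alt_nil] using this

theorem alt_scan_spec (b r : List Char) (hbc : ')' ∉ b) : alt_scan (b ++ ')' :: r) = (b, r) := by
  induction b with
  | nil => simp [alt_scan]
  | cons x xs ih =>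
    have hx : x ≠ ')' := (List.ne_of_not_mem_cons hbc).symm
    rw [List.cons_append, alt_scan, if_neg hx, ih (List.not_mem_of_not_mem_cons hbc)]

theorem alt_group (b r : List Char) (hbc : ')' ∉ b) :
    alt_go ('(' :: (b ++ ')' :: r)) = alt_param b ++ alt_go r := by
  rw [alt_cons_open, alt_scan_spec _ _ hbc]

theorem mem_alt_param (b : List Char) (c : Char) (h : c ∈ alt_param b) : c ∈ b := by
  have h' : c ∈ (if PySem.Chars.find b "<".toList ≠ -1 ∧
      PySem.Chars.find b "<".toList ≤ PySem.Chars.find b ">".toList then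
      PySem.Chars.slice b (some (PySem.Chars.find b "<".toList))
        (some (PySem.Chars.find b ">".toList + 1)) else []) := h
  split_ifs at h' with hc
  · simp only [PySem.Chars.slice_eq_listSlice] at h'
    exact PySem.List.mem_of_mem_slice _ _ _ h'
  · simp at h'

-- §6 replacing every copy of the leftmost group commutes with B's scan
theorem repl_wf (b param : List Char) (hbo : '(' ∉ b) (hbc : ')' ∉ b)
    (hpo : '(' ∉ param) (hpc : ')' ∉ param) (hparam : alt_param b = param) :
    ∀ n r, r.length ≤ n → wfOut r = true →
      wfOut (repl '(' (b ++ [')']) param r) = true ∧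
      (repl '(' (b ++ [')']) param r).count '(' ≤ r.count '(' ∧
      alt_go (repl '(' (b ++ [')']) param r) = alt_go r := by
  intro n
  induction n with
  | zero =>
    intro r hr hwf
    have hnil : r = [] := List.eq_nil_of_length_eq_zero (by omega)
    subst hnil
    refine ⟨?_, ?_, ?_⟩ <;> simp [repl_nil, wfOut]
  | succ n ih =>
    intro r hr hwf
    by_cases hmem : '(' ∈ r
    · obtain ⟨p, b', r', rfl, hpo', hpc', hbo', hbc', hwf'⟩ := wf_decomp r hwf hmem
      have hr' : r'.length ≤ n := by simp at hr; omega
      obtain ⟨hw', hc', ha'⟩ := ih r' hr' hwf'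
      rw [repl_free _ _ _ p _ hpo']
      by_cases hb' : b' = b
      · subst hb'
        rw [repl_hit _ _ _ hbc']
        refine ⟨?_, ?_, ?_⟩
        · rw [wfOut_free p _ hpo' hpc', wfOut_free param _ hpo hpc]
          exact hw'
        · simp only [List.count_append, List.count_cons]
          have h0p : p.count '(' = 0 := List.count_eq_zero.mpr hpo'
          have h0b : b'.count '(' = 0 := List.count_eq_zero.mpr hbo'
          have h0pr : param.count '(' = 0 := List.count_eq_zero.mpr hpo
          simp [h0p, h0b, h0pr]
          omega
        · rw [alt_free p _ hpo', alt_free param _ hpo, ha',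
            alt_free p _ hpo', alt_group _ _ hbc', hparam]
      · rw [repl_miss _ _ _ _ hbc hbo' hbc' hb']
        refine ⟨?_, ?_, ?_⟩
        · rw [wfOut_free p _ hpo' hpc', wf_group _ _ hbo' hbc']
          exact hw'
        · simp only [List.count_append, List.count_cons]
          omega
        · rw [alt_free p _ hpo', alt_group _ _ hbc', ha',
            alt_free p _ hpo', alt_group _ _ hbc']
    · rw [repl_id _ _ _ _ hmem]
      exact ⟨hwf, le_rfl, rfl⟩

theorem wf_count :
    ∀ n cs, cs.length ≤ n → wfOut cs = true → 2 * cs.count '(' ≤ cs.length := by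
  intro n
  induction n with
  | zero =>
    intro cs h _
    have : cs = [] := List.eq_nil_of_length_eq_zero (by omega)
    subst this; simp
  | succ n ih =>
    intro cs h hwf
    by_cases hmem : '(' ∈ cs
    · obtain ⟨p, b, r, rfl, hpo, hpc, hbo, hbc, hwfr⟩ := wf_decomp cs hwf hmem
      have hr : r.length ≤ n := by simp at h; omega
      have := ih r hr hwfr
      have h0p : p.count '(' = 0 := List.count_eq_zero.mpr hpo
      have h0b : b.count '(' = 0 := List.count_eq_zero.mpr hbo
      simp [List.count_append, h0p, h0b]
      omega
    · rw [List.count_eq_zero.mpr hmem]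
      simp

-- §7 the main induction: A's fuelled recursion equals B's single scan
theorem A_go_id (n : Nat) (s : String) (h : '(' ∉ s.toList) :
    reconstruct_route_go n s = s := by
  cases n with
  | zero => rfl
  | succ n =>
    have hfind : PySem.Str.find s "(" = -1 := by
      rw [PySem.Str.find_eq, show ("(" : String).toList = ['('] from by decide]
      exact find_none _ _ h
    rw [reconstruct_route_go, if_pos hfind]

theorem A_go_alt :
    ∀ (n : Nat) (s : String), wfOut s.toList = true → s.toList.count '(' < n →
      reconstruct_route_go n s = String.ofList (alt_go s.toList) := by
  intro n
  induction n with
  | zero => intro s _ h; exact absurd h (Nat.not_lt_zero _)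
  | succ n ih =>
    intro s hwf hcnt
    by_cases hmem : '(' ∈ s.toList
    · obtain ⟨p, b, r, htl, hpo, hpc, hbo, hbc, hwfr⟩ := wf_decomp s.toList hwf hmem
      have hfind1 : PySem.Str.find s "(" = (p.length : Int) := by
        rw [PySem.Str.find_eq, show ("(" : String).toList = ['('] from by decide, htl]
        exact find_first p '(' _ hpo
      have hfind2 : PySem.Str.find s ")" = ((p.length + 1 + b.length : Nat) : Int) := by
        rw [PySem.Str.find_eq, show (")" : String).toList = [')'] from by decide, htl,
          show p ++ '(' :: (b ++ ')' :: r) = (p ++ '(' :: b) ++ ')' :: r from by simp]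
        have := find_first (p ++ '(' :: b) ')' r (by simp [hpc, hbc])
        rw [this]
        push_cast
        simp
        ring
      have hregex : (PySem.Str.slice s (some (PySem.Str.find s "("))
          (some (PySem.Str.find s ")" + 1))).toList = '(' :: (b ++ [')']) := by
        rw [PySem.Str.toList_slice, hfind1, hfind2]
        simp only [PySem.Chars.slice_eq_listSlice]
        rw [show ((p.length + 1 + b.length : Nat) : Int) + 1
            = ((p.length + 1 + b.length + 1 : Nat) : Int) from by push_cast; ring,
          PySem.List.slice_natCast, htl, List.drop_left]
        rw [show p.length + 1 + b.length + 1 - p.length = b.length + 2 from by omega]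
        rw [show ('(' :: (b ++ ')' :: r)) = '(' :: ((b ++ [')']) ++ r) from by simp,
          List.take_succ_cons]
        congr 1
        rw [show b.length + 1 = (b ++ [')']).length from by simp, List.take_left]
      rw [reconstruct_route_go]
      dsimp only
      rw [if_neg (by rw [hfind1]; omega)]
      set regex := PySem.Str.slice s (some (PySem.Str.find s "("))
          (some (PySem.Str.find s ")" + 1)) with hregexdef
      have hparamtl : (PySem.Str.slice regex (some (PySem.Str.find regex "<"))
          (some (PySem.Str.find regex ">" + 1))).toList = alt_param b := by
        rw [PySem.Str.toList_slice, PySem.Str.find_eq, PySem.Str.find_eq,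
          show ("<" : String).toList = ['<'] from by decide,
          show (">" : String).toList = ['>'] from by decide, hregex]
        exact param_regex b
      set param := PySem.Str.slice regex (some (PySem.Str.find regex "<"))
          (some (PySem.Str.find regex ">" + 1)) with hparamdef
      have hppo : '(' ∉ alt_param b := fun hm => hbo (mem_alt_param b _ hm)
      have hppc : ')' ∉ alt_param b := fun hm => hbc (mem_alt_param b _ hm)
      have hreptl : (PySem.Str.replace s regex param).toList
          = p ++ alt_param b ++ repl '(' (b ++ [')']) (alt_param b) r := by
        rw [PySem.Str.toList_replace, hregex, hparamtl, htl,
          show ('(' :: (b ++ [')'])) = '(' :: (b ++ [')']) from rfl]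
        rw [replace_eq_repl '(' (b ++ [')']) (alt_param b) _]
        rw [repl_free _ _ _ p _ hpo, repl_hit _ _ _ hbc]
        simp
      obtain ⟨hw', hc', ha'⟩ :=
        repl_wf b (alt_param b) hbo hbc hppo hppc rfl r.length r le_rfl hwfr
      have hcount : s.toList.count '(' = r.count '(' + 1 := by
        rw [htl]
        simp [List.count_append, List.count_eq_zero.mpr hpo,
          List.count_eq_zero.mpr hbo]
      rw [ih (PySem.Str.replace s regex param)
        (by rw [hreptl, List.append_assoc, wfOut_free p _ hpo hpc, wfOut_free _ _ hppo hppc]; exact hw')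
        (by
          rw [hreptl]
          have : (p ++ alt_param b ++ repl '(' (b ++ [')']) (alt_param b) r).count '('
              = (repl '(' (b ++ [')']) (alt_param b) r).count '(' := by
            simp [List.count_append, List.count_eq_zero.mpr hpo,
              List.count_eq_zero.mpr hppo]
          rw [this]
          omega)]
      rw [hreptl, List.append_assoc, alt_free p _ hpo, alt_free _ _ hppo, ha']
      rw [htl, alt_free p _ hpo, alt_group _ _ hbc]
    · rw [A_go_id _ _ hmem, alt_id _ hmem, String.ofList_toList]

-- ===== VERDICT (by name: the statement is the Claim_ definition above) =====
theorem reconstruct_route_spec : Claim_equal_reconstruct_route := by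
  intro route _ hpre
  unfold Spec_reconstruct_route reconstruct_route reconstruct_route_alt
  by_cases hmem : '(' ∈ route.toList
  · apply A_go_alt _ _ hpre
    have h2 := wf_count route.toList.length route.toList le_rfl hpre
    have h1 : 0 < route.toList.count '(' := List.count_pos_iff.mpr hmem
    have h3 : (PySem.Str.len route).toNat = route.toList.length := by simp
    omega
  · rw [A_go_id _ _ hmem, alt_id _ hmem, String.ofList_toList]
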